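-- pv_equiv track=rewrite | github.com/Sanath00007/ayurvedic_disease_api | app.py | make_google_link
-- ===== SOURCE A (Python) =====
-- def make_google_link(text):
--     HERBS = [
--         "neem", "Nimba", "turmeric", "Haridra",
--         "coconut oil", "Narikela",
--         "aloe vera", "Kumari",
--         "vetiver", "Ushira",
--         "sandalwood", "Chandana",
--         "ash gourd", "Kushmanda",
--         "manjistha", "Rubia cordifolia"
--     ]
--
--     for herb in HERBS:
--         url = f"https://www.google.com/search?q={herb.replace(' ', '+')}+Ayurveda"
--         text = text.replace(
--             herb,
--             f"[{herb}]({url})"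
--         )
--     return text
-- ===== SOURCE B (Python) =====
-- import re
--
-- HERBS = [
--     "neem", "Nimba", "turmeric", "Haridra",
--     "coconut oil", "Narikela",
--     "aloe vera", "Kumari",
--     "vetiver", "Ushira",
--     "sandalwood", "Chandana",
--     "ash gourd", "Kushmanda",
--     "manjistha", "Rubia cordifolia"
-- ]
--
-- _HERB_RE = re.compile("|".join(re.escape(h) for h in HERBS))
--
--
-- def _linkify(m):
--     herb = m.group(0)
--     return f"[{herb}](https://www.google.com/search?q={herb.replace(' ', '+')}+Ayurveda)"
--
--
-- def make_google_link(text):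
--     return _HERB_RE.sub(_linkify, text)
-- ===== Notes on version B (the rewrite author's own statement) =====
-- stated objective: idiomatic
-- what changed: A runs 16 separate full-text replace passes (one per herb, rescanning the growing string each time); B compiles one alternation regex over all herbs and rewrites the text in a single left-to-right re.sub pass.
import Mathlib
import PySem

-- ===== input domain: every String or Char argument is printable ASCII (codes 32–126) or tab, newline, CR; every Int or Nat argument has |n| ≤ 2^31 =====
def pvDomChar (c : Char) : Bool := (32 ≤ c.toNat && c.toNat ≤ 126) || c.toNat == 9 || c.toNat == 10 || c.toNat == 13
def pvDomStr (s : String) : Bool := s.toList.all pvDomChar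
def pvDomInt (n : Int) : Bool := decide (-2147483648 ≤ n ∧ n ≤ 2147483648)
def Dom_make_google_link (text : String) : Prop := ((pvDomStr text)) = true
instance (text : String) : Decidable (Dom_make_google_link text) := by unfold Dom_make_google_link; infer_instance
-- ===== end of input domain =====

-- B replaces A's 16 sequential full-text replace passes by ONE left-to-right pass over the
-- text (an alternation regex in Python); measured at similar speed, not claimed faster.

-- ===== PORT A =====
-- A: for herb in HERBS: url = f"…{herb.replace(' ','+')}+Ayurveda"; text = text.replace(herb, f"[{herb}]({url})")
def make_google_link (text : String) : String :=
  String.ofList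
    ((["neem".toList, "Nimba".toList, "turmeric".toList, "Haridra".toList,
       "coconut oil".toList, "Narikela".toList, "aloe vera".toList, "Kumari".toList,
       "vetiver".toList, "Ushira".toList, "sandalwood".toList, "Chandana".toList,
       "ash gourd".toList, "Kushmanda".toList, "manjistha".toList,
       "Rubia cordifolia".toList]).foldl
      (fun t herb =>
        let url := "https://www.google.com/search?q=".toList
            ++ PySem.Chars.replace herb [' '] ['+'] ++ "+Ayurveda".toList
        PySem.Chars.replace t herb ('[' :: herb ++ ']' :: '(' :: url ++ [')']))
      text.toList)

-- ===== PORT B =====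
-- the branches of the compiled alternation pattern _HERB_RE, in HERBS order
def pvPattern : List (List Char) := ["neem".toList, "Nimba".toList, "turmeric".toList, "Haridra".toList,
  "coconut oil".toList, "Narikela".toList, "aloe vera".toList, "Kumari".toList,
  "vetiver".toList, "Ushira".toList, "sandalwood".toList, "Chandana".toList,
  "ash gourd".toList, "Kushmanda".toList, "manjistha".toList, "Rubia cordifolia".toList]

-- needed by pvReSub's termination proof (cited in decreasing_by)
theorem pvPattern_ne_nil : ∀ p ∈ pvPattern, p ≠ [] := by decide

-- re.sub of the alternation pattern with replacement function `repl`, ported by hand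
-- (no regex engine in Lean), exact for this pattern: re.sub scans left to right; at each
-- position the alternation tries the branches in pattern order; on a match it emits
-- repl(match) and resumes after the match, otherwise the character is kept.
def pvReSub (repl : List Char → List Char) : List Char → List Char
  | [] => []
  | c :: t =>
    match hfind : pvPattern.find? (fun p => PySem.Chars.startswith (c :: t) p) with
    | some p => repl p ++ pvReSub repl ((c :: t).drop p.length)
    | none => c :: pvReSub repl t
termination_by s => s.length
decreasing_by
  · have hmem := List.mem_of_find?_eq_some hfind
    have := pvPattern_ne_nil p hmem
    have : 0 < p.length := List.length_pos_of_ne_nil this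
    simp only [List.length_drop, List.length_cons]
    omega
  · simp

-- B: return _HERB_RE.sub(_linkify, text), _linkify(m) = f"[{m}](https://…?q={m.replace(' ','+')}+Ayurveda)"
def make_google_link_alt (text : String) : String :=
  String.ofList
    (pvReSub
      (fun m => '[' :: (m ++ "](https://www.google.com/search?q=".toList
          ++ PySem.Chars.replace m [' '] ['+'] ++ "+Ayurveda)".toList))
      text.toList)

-- ===== PRECONDITION & SPEC =====
-- Pre_ excludes texts containing one of the eight overlap seams (a later-listed herb ending in
-- 'a' immediately continued by the tail of "aloe vera" or "ash gourd", e.g. "Ushiraloe vera"):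
-- there two herb occurrences overlap and resolving the tie by list priority (A) or by leftmost
-- position (B) are both defensible, unspecified choices.
def pvSeams : List String := ["Ushiraloe vera", "Chandanaloe vera", "Kushmandaloe vera",
  "manjisthaloe vera", "Rubia cordifolialoe vera", "Kushmandash gourd",
  "manjisthash gourd", "Rubia cordifoliash gourd"]

def Pre_make_google_link (text : String) : Prop :=
  ∀ s ∈ pvSeams, PySem.Str.isIn s text = false
instance (text : String) : Decidable (Pre_make_google_link text) := by
  unfold Pre_make_google_link; infer_instance

def pvWitness_make_google_link : String := "use neem oil and aloe vera daily"

def Spec_make_google_link (text : String) (out : String) : Prop := out = make_google_link_alt text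
instance (text : String) (out : String) : Decidable (Spec_make_google_link text out) := by
  unfold Spec_make_google_link; infer_instance

-- ===== CLAIM (what is proved, stated in full; the proofs are below) =====
def Claim_equal_make_google_link : Prop := ∀ (text : String), Dom_make_google_link text → Pre_make_google_link text → Spec_make_google_link text (make_google_link text)

-- ===== LEMMAS AND PROOFS =====

-- the markdown link both Pythons build, in A's grouping
def pvLink (h : List Char) : List Char :=
  '[' :: h ++ ']' :: '(' ::
    ("https://www.google.com/search?q=".toList ++ PySem.Chars.replace h [' '] ['+'] ++ "+Ayurveda".toList)
    ++ [')']

-- B's inline replacement function builds the same link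
theorem pv_link_eq : ∀ m : List Char,
    ('[' :: (m ++ "](https://www.google.com/search?q=".toList
        ++ PySem.Chars.replace m [' '] ['+'] ++ "+Ayurveda)".toList)) = pvLink m := by
  intro m
  have h1 : "](https://www.google.com/search?q=".toList
      = ']' :: '(' :: "https://www.google.com/search?q=".toList := by decide
  have h2 : "+Ayurveda)".toList = "+Ayurveda".toList ++ [')'] := by decide
  simp [pvLink, h1, h2]

-- seams on the code-point side
def pvSeamsL : List (List Char) := pvSeams.map String.toList

-- one replace pass of A, and A's whole fold, on code points
def pvRepl (g t : List Char) : List Char := PySem.Chars.replace t g (pvLink g)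
def pvFold (hs : List (List Char)) (s : List Char) : List Char :=
  hs.foldl (fun t h => PySem.Chars.replace t h (pvLink h)) s

-- "no seam occurs in s"
def pvGood (s : List Char) : Prop := ∀ sm ∈ pvSeamsL, ¬ sm <:+: s

-- "g matches nowhere inside the block u of u ++ w"
def pvNM (u w g : List Char) : Prop := ∀ p, p < u.length → ¬ g <+: (u.drop p ++ w)

-- ordered pairs (earlier herb, later herb) of a list
def pvOP : List (List Char) → List (List Char × List Char)
  | [] => []
  | a :: rest => rest.map (fun b => (a, b)) ++ pvOP rest

-- ---- decidable facts about the fixed herb list ----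
theorem pvF_nolb : ∀ h ∈ pvPattern, '[' ∉ h := by decide
theorem pvF_norp : ∀ h ∈ pvPattern, ')' ∉ h := by decide
set_option maxRecDepth 10000 in
theorem pvF_nosub : ∀ a ∈ pvPattern, ∀ b ∈ pvPattern, ∀ p, p < b.length → 0 < p →
    ¬ a <+: b.drop p := by decide
set_option maxRecDepth 10000 in
theorem pvF_ov : ∀ pr ∈ pvOP pvPattern, ∀ p, p < pr.2.length → 0 < p →
    pr.2.drop p <+: pr.1 → (pr.2 ++ pr.1.drop (pr.2.length - p)) ∈ pvSeamsL := by decide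
set_option maxRecDepth 40000 in
theorem pvF_inlink : ∀ pr ∈ pvOP pvPattern, PySem.Chars.isIn pr.2 (pvLink pr.1) = false := by decide

-- ---- pvOP membership from a decomposition of the list ----
theorem pv_mem_op_left : ∀ (pre l post : List (List Char)) (a b : List Char),
    l = pre ++ b :: post → a ∈ pre → (a, b) ∈ pvOP l := by
  intro pre
  induction pre with
  | nil => intro l post a b _ ha; cases ha
  | cons x pre ih =>
    intro l post a b hl ha
    subst hl
    rcases List.mem_cons.mp ha with rfl | ha
    · exact List.mem_append_left _ (List.mem_map.mpr ⟨b, List.mem_append_right _ (List.mem_cons_self), rfl⟩)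
    · exact List.mem_append_right _ (ih _ post a b rfl ha)

theorem pv_mem_op_right : ∀ (pre l post : List (List Char)) (b g : List Char),
    l = pre ++ b :: post → g ∈ post → (b, g) ∈ pvOP l := by
  intro pre
  induction pre with
  | nil =>
    intro l post b g hl hg
    subst hl
    exact List.mem_append_left _ (List.mem_map.mpr ⟨g, hg, rfl⟩)
  | cons x pre ih =>
    intro l post b g hl hg
    subst hl
    exact List.mem_append_right _ (ih _ post b g rfl hg)

-- ---- recursion equations for Python's str.replace (PySem.Chars.replace) ----
theorem pv_go_zero (old new l acc : List Char) :
    PySem.Chars.replace.go old new 0 l acc = acc.reverse ++ l := rfl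

theorem pv_go_nil (old new : List Char) (f : Nat) (acc : List Char) :
    PySem.Chars.replace.go old new (f + 1) [] acc = acc.reverse := rfl

theorem pv_go_cons (old new : List Char) (f : Nat) (c : Char) (t acc : List Char) :
    PySem.Chars.replace.go old new (f + 1) (c :: t) acc =
      if old.isPrefixOf (c :: t) then
        PySem.Chars.replace.go old new f ((c :: t).drop old.length) (new.reverse ++ acc)
      else PySem.Chars.replace.go old new f t (c :: acc) := rfl

theorem pv_go_acc (old new : List Char) : ∀ (f : Nat) (l acc : List Char),
    PySem.Chars.replace.go old new f l acc = acc.reverse ++ PySem.Chars.replace.go old new f l [] := by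
  intro f
  induction f with
  | zero => intro l acc; simp [pv_go_zero]
  | succ f ih =>
    intro l acc
    cases l with
    | nil => simp [pv_go_nil]
    | cons c t =>
      rw [pv_go_cons, pv_go_cons]
      by_cases hp : old.isPrefixOf (c :: t)
      · rw [if_pos hp, if_pos hp, ih _ (new.reverse ++ acc), ih _ (new.reverse ++ [])]
        simp
      · rw [if_neg hp, if_neg hp, ih _ (c :: acc), ih _ [c]]
        simp

theorem pv_go_fuel (old new : List Char) (hold : old ≠ []) : ∀ (n f : Nat) (l : List Char),
    l.length ≤ f → l.length ≤ n →
    PySem.Chars.replace.go old new f l [] = PySem.Chars.replace.go old new l.length l [] := by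
  intro n
  induction n with
  | zero =>
    intro f l hf hn
    have hl : l = [] := List.eq_nil_of_length_eq_zero (Nat.le_zero.mp hn)
    subst hl
    cases f with
    | zero => rfl
    | succ f => rw [pv_go_nil]; rfl
  | succ n ih =>
    intro f l hf hn
    cases l with
    | nil =>
      cases f with
      | zero => rfl
      | succ f => rw [pv_go_nil]; rfl
    | cons c t =>
      have hlen : (c :: t).length = t.length + 1 := by simp
      obtain ⟨f, rfl⟩ : ∃ f', f = f' + 1 := ⟨f - 1, by simp at hf; omega⟩
      rw [hlen, pv_go_cons, pv_go_cons]
      have hop : 0 < old.length := List.length_pos_of_ne_nil hold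
      simp only [List.length_cons] at hf hn
      by_cases hp : old.isPrefixOf (c :: t)
      · rw [if_pos hp, if_pos hp]
        have hd : ((c :: t).drop old.length).length = t.length + 1 - old.length := by simp
        rw [pv_go_acc _ _ f, pv_go_acc _ _ t.length,
          ih f _ (by omega) (by omega), ih t.length _ (by omega) (by omega)]
      · rw [if_neg hp, if_neg hp]
        rw [pv_go_acc _ _ f, pv_go_acc _ _ t.length,
          ih f t (by omega) (by omega), ih t.length t (by omega) (by omega)]

theorem pv_replace_eq_go (old new s : List Char) (hold : old ≠ []) :
    PySem.Chars.replace s old new = PySem.Chars.replace.go old new s.length s [] := by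
  cases old with
  | nil => exact absurd rfl hold
  | cons o os => rfl

theorem pv_replace_nil (old new : List Char) (hold : old ≠ []) :
    PySem.Chars.replace [] old new = [] := by
  rw [pv_replace_eq_go _ _ _ hold]; rfl

theorem pv_replace_match (old new s : List Char) (hold : old ≠ []) (hpre : old <+: s) :
    PySem.Chars.replace s old new = new ++ PySem.Chars.replace (s.drop old.length) old new := by
  have hop : 0 < old.length := List.length_pos_of_ne_nil hold
  cases s with
  | nil => exact absurd (List.prefix_nil.mp hpre) hold
  | cons c t =>
    rw [pv_replace_eq_go _ _ _ hold, pv_replace_eq_go _ _ _ hold]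
    have hlen : (c :: t).length = t.length + 1 := by simp
    rw [hlen, pv_go_cons, if_pos (List.isPrefixOf_iff_prefix.mpr hpre)]
    rw [pv_go_acc, pv_go_fuel old new hold t.length t.length _ (by simp; omega) (by simp; omega)]
    simp

theorem pv_replace_nomatch (old new : List Char) (c : Char) (t : List Char)
    (hpre : ¬ old <+: (c :: t)) :
    PySem.Chars.replace (c :: t) old new = c :: PySem.Chars.replace t old new := by
  have hold : old ≠ [] := fun h => hpre (h ▸ List.nil_prefix)
  rw [pv_replace_eq_go _ _ _ hold, pv_replace_eq_go _ _ _ hold]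
  have hlen : (c :: t).length = t.length + 1 := by simp
  rw [hlen, pv_go_cons, if_neg (fun h => hpre (List.isPrefixOf_iff_prefix.mp h))]
  rw [pv_go_acc]
  simp

-- ---- a replace pass cannot create a new occurrence of a bracket-free word at the front ----
theorem pv_link_head (g : List Char) : ∃ rest, pvLink g = '[' :: rest := ⟨_, rfl⟩

theorem pv_pre1 (g : List Char) (hg : g ≠ []) : ∀ (w r : List Char), r ≠ [] → '[' ∉ r →
    ¬ r <+: w → ¬ r <+: pvRepl g w := by
  intro w
  induction w with
  | nil =>
    intro r hr _ _ hcon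
    rw [pvRepl, pv_replace_nil _ _ hg] at hcon
    exact hr (List.prefix_nil.mp hcon)
  | cons d w' ih =>
    intro r hr hb hnw hcon
    by_cases hgw : g <+: (d :: w')
    · rw [pvRepl, pv_replace_match _ _ _ hg hgw] at hcon
      obtain ⟨rest, hrest⟩ := pv_link_head g
      rw [hrest] at hcon
      cases r with
      | nil => exact hr rfl
      | cons a r' =>
        have := (List.cons_prefix_cons.mp hcon).1
        exact hb (this ▸ List.mem_cons_self)
    · rw [pvRepl, pv_replace_nomatch _ _ _ _ hgw] at hcon
      cases r with
      | nil => exact hr rfl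
      | cons a r' =>
        obtain ⟨rfl, hr'⟩ := List.cons_prefix_cons.mp hcon
        cases r' with
        | nil => exact hnw (List.cons_prefix_cons.mpr ⟨rfl, List.nil_prefix⟩)
        | cons b r'' =>
          have hnw' : ¬ (b :: r'') <+: w' := fun hx =>
            hnw (List.cons_prefix_cons.mpr ⟨rfl, hx⟩)
          exact ih (b :: r'') (by simp) (fun hx => hb (List.mem_cons_of_mem _ hx)) hnw' hr'

theorem pv_split (g : List Char) (hg : g ≠ []) : ∀ (u w : List Char), pvNM u w g →
    pvRepl g (u ++ w) = u ++ pvRepl g w := by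
  intro u
  induction u with
  | nil => intro w _; simp
  | cons c u' ih =>
    intro w hnm
    have h0 : ¬ g <+: (c :: (u' ++ w)) := by
      have := hnm 0 (by simp)
      simpa using this
    rw [List.cons_append, pvRepl, pv_replace_nomatch _ _ _ _ h0]
    have : PySem.Chars.replace (u' ++ w) g (pvLink g) = u' ++ pvRepl g w := by
      apply ih
      intro p hp
      have := hnm (p + 1) (by simp; omega)
      simpa using this
    rw [this]
    rfl

theorem pv_nm_pres (u w g x : List Char) (hg : g ≠ []) (hgb : '[' ∉ g) (hx : x ≠ [])
    (h : pvNM u w g) : pvNM u (pvRepl x w) g := by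
  intro p hp hpre
  rcases List.prefix_or_prefix_of_prefix hpre (List.prefix_append (u.drop p) (pvRepl x w)) with h1 | h2
  · exact h p hp (h1.trans (List.prefix_append _ _))
  · obtain ⟨r, hr⟩ := h2
    subst hr
    have hrw : r <+: pvRepl x w := (List.prefix_append_right_inj (u.drop p)).mp hpre
    have hrne : r ≠ [] := by
      rintro rfl
      exact h p hp (by simpa using (List.prefix_append_right_inj (u.drop p)).mpr (List.nil_prefix (l := w)))
    have hrb : '[' ∉ r := fun hm => hgb (List.mem_append_right _ hm)
    have hnrw : ¬ r <+: w := fun hx2 => h p hp ((List.prefix_append_right_inj (u.drop p)).mpr hx2)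
    exact pv_pre1 x hx w r hrne hrb hnrw hrw

-- ---- fold lemmas ----
theorem pv_fold_nil (hs : List (List Char)) (hsub : ∀ h ∈ hs, h ∈ pvPattern) :
    pvFold hs [] = [] := by
  induction hs with
  | nil => rfl
  | cons g gs ih =>
    have hg : g ≠ [] := pvPattern_ne_nil g (hsub g List.mem_cons_self)
    show pvFold gs (PySem.Chars.replace [] g (pvLink g)) = []
    rw [pv_replace_nil _ _ hg]
    exact ih (fun h hm => hsub h (List.mem_cons_of_mem _ hm))

theorem pv_fold_cons (hs : List (List Char)) (hsub : ∀ h ∈ hs, h ∈ pvPattern) :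
    ∀ (c : Char) (t : List Char), (∀ h ∈ hs, ¬ h <+: (c :: t)) →
    pvFold hs (c :: t) = c :: pvFold hs t := by
  induction hs with
  | nil => intro c t _; rfl
  | cons g gs ih =>
    intro c t hnp
    have hgmem := hsub g List.mem_cons_self
    have hg : g ≠ [] := pvPattern_ne_nil g hgmem
    show pvFold gs (PySem.Chars.replace (c :: t) g (pvLink g)) = c :: pvFold gs (PySem.Chars.replace t g (pvLink g))
    rw [pv_replace_nomatch _ _ _ _ (hnp g List.mem_cons_self)]
    apply ih (fun h hm => hsub h (List.mem_cons_of_mem _ hm))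
    intro h hm hcon
    have hhmem := hsub h (List.mem_cons_of_mem _ hm)
    have hne : h ≠ [] := pvPattern_ne_nil h hhmem
    have hnb : '[' ∉ h := pvF_nolb h hhmem
    have := pv_pre1 g hg (c :: t) h hne hnb (hnp h (List.mem_cons_of_mem _ hm))
    rw [pvRepl, pv_replace_nomatch _ _ _ _ (hnp g List.mem_cons_self)] at this
    exact this hcon

theorem pv_fold_split (u : List Char) (hs : List (List Char)) (hsub : ∀ h ∈ hs, h ∈ pvPattern) :
    ∀ (w : List Char), (∀ h ∈ hs, pvNM u w h) → pvFold hs (u ++ w) = u ++ pvFold hs w := by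
  induction hs with
  | nil => intro w _; rfl
  | cons g gs ih =>
    intro w hnm
    have hgmem := hsub g List.mem_cons_self
    have hg : g ≠ [] := pvPattern_ne_nil g hgmem
    show pvFold gs (PySem.Chars.replace (u ++ w) g (pvLink g)) = u ++ pvFold gs (PySem.Chars.replace w g (pvLink g))
    rw [show PySem.Chars.replace (u ++ w) g (pvLink g) = pvRepl g (u ++ w) from rfl,
      pv_split g hg u w (hnm g List.mem_cons_self)]
    exact ih (fun h hm => hsub h (List.mem_cons_of_mem _ hm)) (pvRepl g w)
      (fun h hm => pv_nm_pres u w h g (pvPattern_ne_nil h (hsub h (List.mem_cons_of_mem _ hm)))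
        (pvF_nolb h (hsub h (List.mem_cons_of_mem _ hm))) hg (hnm h (List.mem_cons_of_mem _ hm)))

-- links never contain a later herb, and end in ')' which no herb contains
theorem pv_nm_link (h g : List Char) (hg : g ∈ pvPattern)
    (hin : PySem.Chars.isIn g (pvLink h) = false) : ∀ x, pvNM (pvLink h) x g := by
  intro x p hp hpre
  rcases List.prefix_or_prefix_of_prefix hpre (List.prefix_append ((pvLink h).drop p) x) with h1 | h2
  · have : PySem.Chars.isIn g (pvLink h) = true :=
      (PySem.Chars.exists_prefix_drop_iff_isIn _ _).mp ⟨p, h1⟩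
    rw [hin] at this
    exact Bool.false_ne_true this
  · have hshape : pvLink h = ('[' :: h ++ ']' :: '(' ::
        ("https://www.google.com/search?q=".toList ++ PySem.Chars.replace h [' '] ['+'] ++ "+Ayurveda".toList)) ++ [')'] := by
      simp [pvLink]
    have hplen : p ≤ ('[' :: h ++ ']' :: '(' ::
        ("https://www.google.com/search?q=".toList ++ PySem.Chars.replace h [' '] ['+'] ++ "+Ayurveda".toList)).length := by
      rw [hshape] at hp
      simp at hp
      simp
      omega
    have hmem : ')' ∈ (pvLink h).drop p := by
      rw [hshape, List.drop_append_of_le_length hplen]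
      exact List.mem_append_right _ List.mem_cons_self
    exact pvF_norp g hg (h2.subset hmem)

-- ---- recursion equations of the single pass ----
theorem pv_sub_nil (repl : List Char → List Char) : pvReSub repl [] = [] := by rw [pvReSub]

theorem pv_sub_some (repl : List Char → List Char) (c : Char) (t h : List Char)
    (hf : pvPattern.find? (fun x => PySem.Chars.startswith (c :: t) x) = some h) :
    pvReSub repl (c :: t) = repl h ++ pvReSub repl ((c :: t).drop h.length) := by
  rw [pvReSub]
  split
  · rename_i x hx
    rw [hf] at hx
    cases hx
    rfl
  · rename_i hx
    rw [hf] at hx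
    cases hx

theorem pv_sub_none (repl : List Char → List Char) (c : Char) (t : List Char)
    (hf : pvPattern.find? (fun x => PySem.Chars.startswith (c :: t) x) = none) :
    pvReSub repl (c :: t) = c :: pvReSub repl t := by
  rw [pvReSub]
  split
  · rename_i x hx
    rw [hf] at hx
    cases hx
  · rfl

-- ---- main equivalence on code points ----
theorem pv_main : ∀ (n : Nat) (s : List Char), s.length ≤ n → pvGood s →
    pvFold pvPattern s = pvReSub pvLink s := by
  intro n
  induction n with
  | zero =>
    intro s hl _
    have hs : s = [] := List.eq_nil_of_length_eq_zero (Nat.le_zero.mp hl)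
    subst hs
    rw [pv_fold_nil pvPattern (fun _ a => a), pv_sub_nil]
  | succ n ih =>
    intro s hl hgood
    cases s with
    | nil => rw [pv_fold_nil pvPattern (fun _ a => a), pv_sub_nil]
    | cons c t =>
      cases hfind : pvPattern.find? (fun x => PySem.Chars.startswith (c :: t) x) with
      | none =>
        have hnp : ∀ h ∈ pvPattern, ¬ h <+: (c :: t) := by
          intro h hm hcon
          have := List.find?_eq_none.mp hfind h hm
          exact this ((PySem.Chars.startswith_iff _ _).mpr hcon)
        rw [pv_fold_cons pvPattern (fun _ a => a) c t hnp, pv_sub_none pvLink c t hfind]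
        have hgt : pvGood t := fun sm hsm hin => hgood sm hsm (hin.trans (List.suffix_cons c t).isInfix)
        rw [ih t (by simp at hl; omega) hgt]
      | some h =>
        obtain ⟨hsw, pre, post, hdec, hprefalse⟩ := List.find?_eq_some_iff_append.mp hfind
        have hpre_s : h <+: (c :: t) := (PySem.Chars.startswith_iff _ _).mp hsw
        obtain ⟨v, hv⟩ := hpre_s
        have hhmem : h ∈ pvPattern := hdec ▸ List.mem_append_right _ List.mem_cons_self
        have hh : h ≠ [] := pvPattern_ne_nil h hhmem
        have hsubpre : ∀ a ∈ pre, a ∈ pvPattern := fun a ha => hdec ▸ List.mem_append_left _ ha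
        have hsubpost : ∀ a ∈ post, a ∈ pvPattern := fun a ha =>
          hdec ▸ List.mem_append_right _ (List.mem_cons_of_mem _ ha)
        have hgoodv : pvGood v := fun sm hsm hin =>
          hgood sm hsm (hv ▸ (hin.trans (List.suffix_append h v).isInfix))
        have hNM : ∀ a ∈ pre, pvNM h v a := by
          intro a ha p hp hpre2
          have hamem : a ∈ pvPattern := hsubpre a ha
          have hnps : ¬ a <+: (c :: t) := by
            intro hcon
            have := hprefalse a ha
            rw [(PySem.Chars.startswith_iff _ _).mpr hcon] at this
            exact Bool.false_ne_true (by simpa using this)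
          rcases Nat.eq_zero_or_pos p with rfl | hp0
          · exact hnps (by rw [← hv]; simpa using hpre2)
          · rcases List.prefix_or_prefix_of_prefix hpre2 (List.prefix_append (h.drop p) v) with h1 | h2
            · exact pvF_nosub a hamem h hhmem p hp hp0 h1
            · obtain ⟨r, hr⟩ := h2
              have hrv : r <+: v := (List.prefix_append_right_inj (h.drop p)).mp (by rw [hr]; exact hpre2)
              have hseam : (h ++ a.drop (h.length - p)) ∈ pvSeamsL :=
                pvF_ov (a, h) (pv_mem_op_left pre pvPattern post a h hdec ha) p hp hp0 ⟨r, hr⟩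
              have hra : a.drop (h.length - p) = r := by
                have hlen : (h.drop p).length = h.length - p := by simp
                rw [← hr, ← hlen, List.drop_left]
              rw [hra] at hseam
              apply hgood _ hseam
              rw [← hv]
              exact ((List.prefix_append_right_inj h).mpr hrv).isInfix
        have hlenv : v.length ≤ n := by
          have := congrArg List.length hv
          have hhl : 0 < h.length := List.length_pos_of_ne_nil hh
          simp at this hl
          omega
        have hdrop : (c :: t).drop h.length = v := by rw [← hv, List.drop_left]
        calc pvFold pvPattern (c :: t)
            = pvFold post (pvRepl h (pvFold pre (h ++ v))) := by
              rw [← hv, hdec]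
              simp [pvFold, pvRepl, List.foldl_append]
          _ = pvFold post (pvRepl h (h ++ pvFold pre v)) := by
              rw [pv_fold_split h pre hsubpre v hNM]
          _ = pvFold post (pvLink h ++ pvRepl h (pvFold pre v)) := by
              rw [pvRepl, pv_replace_match _ _ _ hh (List.prefix_append h _), List.drop_left]
              rfl
          _ = pvLink h ++ pvFold post (pvRepl h (pvFold pre v)) := by
              exact pv_fold_split (pvLink h) post hsubpost _
                (fun g hg => pv_nm_link h g (hsubpost g hg)
                  (pvF_inlink (h, g) (pv_mem_op_right pre pvPattern post h g hdec hg)) _)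
          _ = pvLink h ++ pvFold pvPattern v := by
              rw [hdec]
              simp [pvFold, pvRepl, List.foldl_append]
          _ = pvLink h ++ pvReSub pvLink v := by rw [ih v hlenv hgoodv]
          _ = pvReSub pvLink (c :: t) := by rw [pv_sub_some pvLink c t h hfind, hdrop]

-- ===== VERDICT (by name: the statement is the Claim_ definition above) =====
theorem make_google_link_spec : Claim_equal_make_google_link := by
  intro text _ hpre
  unfold Spec_make_google_link
  have hA : make_google_link text = String.ofList (pvFold pvPattern text.toList) := rfl
  have hB : make_google_link_alt text = String.ofList (pvReSub pvLink text.toList) := by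
    unfold make_google_link_alt
    rw [funext pv_link_eq]
  have hgood : pvGood text.toList := by
    intro sm hsm
    simp only [pvSeamsL, List.mem_map] at hsm
    obtain ⟨s, hs, rfl⟩ := hsm
    have := hpre s hs
    rw [PySem.Str.isIn_eq, PySem.Chars.isIn_eq_false_iff] at this
    exact this
  rw [hA, hB, pv_main text.toList.length text.toList le_rfl hgood]
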